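-- pv_equiv track=rewrite | github.com/Baraahalfasly/LearnPython | generate_plural_words.py | pluralize
-- ===== SOURCE A (Python) =====
-- def pluralize(words):
--     # Create a dictionary to count the occurrences of each word
--     word_counts = {}
--     for word in words:
--         word_counts[word] = word_counts.get(word, 0) + 1  # Increment count for each word
--
--     # Create a set to store the final result
--     result = set()
--     for word, count in word_counts.items():
--         if count > 1:  # If the word appears more than once
--             result.add(word + "s")  # Add the plural form
--         else:  # If the word appears only once
--             result.add(word)
--
--     return result
-- ===== SOURCE B (Python) =====
-- def pluralize(words):
--     # Sort-then-scan: after sorting, equal words are adjacent, so one linear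
--     # scan over neighbouring pairs finds every duplicated word (no counting).
--     s = sorted(words)
--     dups = set()
--     for a, b in zip(s, s[1:]):
--         if a == b:
--             dups.add(a)
--     result = set()
--     for word in words:
--         result.add(word + "s" if word in dups else word)
--     return result
-- ===== Notes on version B (the rewrite author's own statement) =====
-- stated objective: alternative
-- what changed: Replaces A's counting dictionary and count>1 test with sort-then-scan duplicate detection: a sorted copy makes equal words adjacent, one scan of neighbouring pairs collects the duplicated words, and the result set is filled per occurrence of the original list.
import Mathlib
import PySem

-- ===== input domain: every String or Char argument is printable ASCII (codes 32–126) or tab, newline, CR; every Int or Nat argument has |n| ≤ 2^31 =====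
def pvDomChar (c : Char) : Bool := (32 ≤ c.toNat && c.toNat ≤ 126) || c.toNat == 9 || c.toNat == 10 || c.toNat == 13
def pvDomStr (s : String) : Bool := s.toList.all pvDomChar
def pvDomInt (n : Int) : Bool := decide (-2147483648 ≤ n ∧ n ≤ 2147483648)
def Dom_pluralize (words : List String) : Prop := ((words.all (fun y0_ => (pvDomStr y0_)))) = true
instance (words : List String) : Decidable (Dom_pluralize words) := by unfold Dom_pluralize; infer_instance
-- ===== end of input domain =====

-- B replaces A's counting dictionary with sort-then-scan duplicate detection (sorted copy, one scan
-- of adjacent pairs) and fills the result set per occurrence of the original list (alternative).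
-- Both Pythons return a set; the ports return its distinct elements in insertion order.

-- ===== PORT A =====
def pluralize (words : List String) : List String :=
  let word_counts : PySem.Dict String Int :=
    words.foldl (fun d word => d.insert word (d.getD word 0 + 1)) PySem.Dict.empty
  word_counts.items.foldl
    (fun (result : PySem.Set String) p =>
      if p.2 > 1 then result.add (p.1 ++ "s") else result.add p.1)
    PySem.Set.empty

-- ===== PORT B =====
def pluralize_alt (words : List String) : List String :=
  let s := PySem.List.sorted words (fun x => x)
  let dups := (s.zip (PySem.List.slice s (some 1) none)).foldl
    (fun (d : PySem.Set String) p => if p.1 == p.2 then d.add p.1 else d)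
    PySem.Set.empty
  words.foldl
    (fun (result : PySem.Set String) word =>
      result.add (if dups.contains word then word ++ "s" else word))
    PySem.Set.empty

-- ===== PRECONDITION & SPEC =====
def Spec_pluralize (words : List String) (out : List String) : Prop := out = pluralize_alt words
instance (words : List String) (out : List String) : Decidable (Spec_pluralize words out) := by unfold Spec_pluralize; infer_instance

-- ===== CLAIM (what is proved, stated in full; the proofs are below) =====
def Claim_equal_pluralize : Prop := ∀ (words : List String), Dom_pluralize words → Spec_pluralize words (pluralize words)

-- ===== LEMMAS AND PROOFS =====

-- the value both programs put into the result set for a word of `words`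
def plForm (words : List String) (w : String) : String :=
  if 2 ≤ words.count w then w ++ "s" else w

-- dedup-first commutes with filter
theorem ofList_filter {α : Type} [BEq α] [LawfulBEq α] (p : α → Bool) (l : List α) :
    PySem.Set.ofList (l.filter p) = (PySem.Set.ofList l).filter p := by
  induction l with
  | nil => simp [PySem.Set.ofList, PySem.Set.empty]
  | cons x l ih =>
    by_cases hp : p x
    · rw [show (x :: l).filter p = x :: l.filter p by simp [hp]]
      rw [PySem.Set.ofList_cons, PySem.Set.ofList_cons]
      simp only [PySem.Set.discard, List.filter_cons, hp]
      rw [ih, List.filter_filter, List.filter_filter]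
      congr 1
      apply List.filter_congr
      intro y _
      cases h : y == x <;> simp
    · rw [show (x :: l).filter p = l.filter p by simp [hp]]
      rw [PySem.Set.ofList_cons]
      simp only [PySem.Set.discard, List.filter_cons, hp]
      rw [ih, List.filter_filter]
      apply (List.filter_congr ?_).symm
      intro y _
      cases hyx : y == x
      · simp
      · have : y = x := by simpa using hyx
        subst this
        simp [hp]

-- deduplicating the input first does not change the deduplicated image
theorem ofList_map_ofList {α : Type} [BEq α] [LawfulBEq α] (g : α → α) (l : List α) :
    PySem.Set.ofList ((PySem.Set.ofList l).map g) = PySem.Set.ofList (l.map g) := by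
  induction l with
  | nil => rfl
  | cons x l ih =>
    rw [PySem.Set.ofList_cons, List.map_cons, PySem.Set.ofList_cons, List.map_cons,
        PySem.Set.ofList_cons]
    simp only [PySem.Set.discard]
    congr 1
    have key : List.filter (fun z => !z == g x)
          (PySem.Set.ofList (List.map g (List.filter (fun y => !y == x) (PySem.Set.ofList l))))
        = List.filter (fun z => !z == g x)
          (PySem.Set.ofList (List.map g (PySem.Set.ofList l))) := by
      rw [← ofList_filter (fun z => !z == g x)
            (List.map g (List.filter (fun y => !y == x) (PySem.Set.ofList l))),
          ← ofList_filter (fun z => !z == g x) (List.map g (PySem.Set.ofList l)),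
          List.filter_map, List.filter_map, List.filter_filter]
      congr 1
      congr 1
      apply List.filter_congr
      intro y _
      cases hyx : y == x
      · simp
      · have : y = x := by simpa using hyx
        subst this
        simp
    rw [key, ih]

-- folding add∘g over a list equals folding it over the deduplicated list
theorem foldl_add_dedup {α : Type} [BEq α] [LawfulBEq α] (g : α → α) (l : List α) :
    List.foldl (fun r k => PySem.Set.add r (g k)) PySem.Set.empty (PySem.Set.ofList l)
      = List.foldl (fun r k => PySem.Set.add r (g k)) PySem.Set.empty l := by
  have e1 : ∀ (m : List α),
      List.foldl (fun r k => PySem.Set.add r (g k)) PySem.Set.empty m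
        = PySem.Set.ofList (m.map g) := by
    intro m
    rw [PySem.Set.ofList_eq_foldl, List.foldl_map]
    rfl
  rw [e1, e1, ofList_map_ofList]

-- A's emission loop adds plForm of each distinct word, in first-occurrence order
theorem A_eq (words : List String) :
    pluralize words
      = List.foldl (fun r k => PySem.Set.add r (plForm words k)) PySem.Set.empty
          (PySem.Set.ofList words) := by
  unfold pluralize
  rw [PySem.Dict.foldl_insert_getD_add_one_eq_counter]
  show (PySem.Dict.counter words).items.foldl
      (fun (result : PySem.Set String) p =>
        if p.2 > 1 then result.add (p.1 ++ "s") else result.add p.1)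
      PySem.Set.empty = _
  rw [PySem.Dict.items_counter, List.foldl_map]
  apply PySem.List.foldl_congr_mem
  intro r k _
  unfold plForm
  by_cases h : 2 ≤ words.count k
  · have h1 : (1 : Int) < (words.count k : Int) := by exact_mod_cast h
    simp [h1, h]
  · have h1 : ¬ ((1 : Int) < (words.count k : Int)) := by exact_mod_cast h
    simp [h1, h]

-- membership after the adjacent-pair scan: exactly the values of equal neighbouring pairs
theorem mem_foldl_addEq (ps : List (String × String)) : ∀ (d : PySem.Set String) (x : String),
    x ∈ ps.foldl (fun (d : PySem.Set String) p => if p.1 == p.2 then d.add p.1 else d) d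
      ↔ x ∈ d ∨ (x, x) ∈ ps := by
  induction ps with
  | nil => intro d x; simp
  | cons p ps ih =>
    intro d x
    rcases p with ⟨a, b⟩
    by_cases hab : a = b
    · subst hab
      rw [List.foldl_cons]
      simp only [beq_self_eq_true, if_true, ih, PySem.Set.mem_add, List.mem_cons,
        Prod.mk.injEq]
      tauto
    · rw [List.foldl_cons]
      have : ((a, b).1 == (a, b).2) = false := by simpa using hab
      simp only [this, ih, List.mem_cons, Prod.mk.injEq]
      constructor
      · rintro (h | h)
        · exact Or.inl h
        · exact Or.inr (Or.inr h)
      · rintro (h | ⟨⟨h1, h2⟩ | h⟩)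
        · exact Or.inl h
        · exact absurd (h1.symm.trans h2) hab
        · exact Or.inr h

-- in a ≤-sorted list, a word occurs twice iff it forms an equal adjacent pair
theorem two_le_count_iff_adj (l : List String) (hs : l.Pairwise (fun a b => a ≤ b)) (x : String) :
    2 ≤ l.count x ↔ (x, x) ∈ l.zip l.tail := by
  induction l with
  | nil => simp
  | cons a t ih =>
    rcases List.pairwise_cons.mp hs with ⟨ha, ht⟩
    cases t with
    | nil =>
      simp only [List.zip_nil_right, List.tail_cons, List.not_mem_nil, iff_false]
      have := List.count_le_length (l := [a]) (a := x)
      simp only [List.length_cons, List.length_nil] at this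
      omega
    | cons b t' =>
      have hzip : (a :: b :: t').zip ((a :: b :: t').tail)
          = (a, b) :: ((b :: t').zip ((b :: t').tail)) := rfl
      rw [hzip, List.mem_cons, ← ih ht, Prod.mk.injEq]
      rcases List.pairwise_cons.mp ht with ⟨hb, _⟩
      constructor
      · intro h2
        rw [List.count_cons] at h2
        by_cases hxa : x = a
        · subst hxa
          simp only [beq_self_eq_true, if_true] at h2
          have hxmem : x ∈ b :: t' := List.count_pos_iff.mp (by omega)
          have hxb : b ≤ x := by
            rcases List.mem_cons.mp hxmem with h | h
            · exact le_of_eq h.symm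
            · exact hb x h
          have hbx : x ≤ b := ha b (List.mem_cons_self)
          exact Or.inl ⟨rfl, le_antisymm hbx hxb⟩
        · right
          have hne : (a == x) = false := beq_eq_false_iff_ne.mpr (fun h => hxa h.symm)
          simp only [hne, Bool.false_eq_true, if_false, add_zero] at h2
          exact h2
      · intro h
        rcases h with ⟨hxa, hxb⟩ | h
        · rw [List.count_cons, List.count_cons]
          have h1 : (a == x) = true := beq_iff_eq.mpr hxa.symm
          have h2 : (b == x) = true := beq_iff_eq.mpr hxb.symm
          rw [h1, h2]
          simp
        · rw [List.count_cons]
          omega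

theorem B_eq (words : List String) :
    pluralize_alt words
      = List.foldl (fun r w => PySem.Set.add r (plForm words w)) PySem.Set.empty words := by
  have hmem : ∀ w : String,
      (((PySem.List.sorted words (fun x => x)).zip
          (PySem.List.slice (PySem.List.sorted words (fun x => x)) (some 1) none)).foldl
        (fun (d : PySem.Set String) p => if p.1 == p.2 then d.add p.1 else d)
        PySem.Set.empty).contains w = true ↔ 2 ≤ words.count w := by
    intro w
    rw [PySem.Set.contains_iff, mem_foldl_addEq, PySem.List.slice_from_one,
        ← two_le_count_iff_adj (PySem.List.sorted words (fun x => x))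
          (by simpa using PySem.List.sorted_pairwise words (fun x => x)) w,
        (PySem.List.sorted_perm words (fun x => x) false).count_eq]
    simp [PySem.Set.empty]
  show List.foldl
      (fun (result : PySem.Set String) word =>
        result.add (if (((PySem.List.sorted words (fun x => x)).zip
            (PySem.List.slice (PySem.List.sorted words (fun x => x)) (some 1) none)).foldl
          (fun (d : PySem.Set String) p => if p.1 == p.2 then d.add p.1 else d)
          PySem.Set.empty).contains word then word ++ "s" else word))
      PySem.Set.empty words = _
  apply PySem.List.foldl_congr_mem
  intro r w _
  unfold plForm
  by_cases h2 : 2 ≤ words.count w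
  · rw [if_pos ((hmem w).mpr h2), if_pos h2]
  · rw [if_neg (fun hc => h2 ((hmem w).mp hc)), if_neg h2]

-- ===== VERDICT (by name: the statement is the Claim_ definition above) =====
theorem pluralize_spec : Claim_equal_pluralize := by
  intro words _
  show pluralize words = pluralize_alt words
  rw [A_eq, B_eq, foldl_add_dedup]
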